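-- pv_equiv track=rewrite | github.com/Felipe-G03/Snakes-Ladders | game/views.py | _celulas_serpentina
-- ===== SOURCE A (Python) =====
-- def _celulas_serpentina(linhas: int, colunas: int):
--     resultado = []
--     for visual_row in range(linhas):
--         row_from_bottom = linhas - 1 - visual_row
--         even = (row_from_bottom % 2 == 0)
--         for col in range(colunas):
--             n = (row_from_bottom * colunas + (col + 1)) if even \
--                 else (row_from_bottom * colunas + (colunas - col))
--             resultado.append(n)
--     return resultado
-- ===== SOURCE B (Python) =====
-- def _celulas_serpentina(linhas: int, colunas: int):
--     # Inverse-mapping scatter: iterate over the VALUES 1..total, compute each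
--     # value's board position directly, and write it into a preallocated list.
--     if linhas <= 0 or colunas <= 0:
--         return []
--     total = linhas * colunas
--     out = [0] * total
--     for v in range(1, total + 1):
--         r, off = divmod(v - 1, colunas)
--         col = off if r % 2 == 0 else colunas - 1 - off
--         out[(linhas - 1 - r) * colunas + col] = v
--     return out
-- ===== Notes on version B (the rewrite author's own statement) =====
-- stated objective: alternative
-- what changed: B inverts the mapping: instead of traversing board positions and computing each cell's value, it iterates over the values 1..linhas*colunas, computes each value's position by divmod on the value, and scatter-writes it into a preallocated output list.
import Mathlib
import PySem

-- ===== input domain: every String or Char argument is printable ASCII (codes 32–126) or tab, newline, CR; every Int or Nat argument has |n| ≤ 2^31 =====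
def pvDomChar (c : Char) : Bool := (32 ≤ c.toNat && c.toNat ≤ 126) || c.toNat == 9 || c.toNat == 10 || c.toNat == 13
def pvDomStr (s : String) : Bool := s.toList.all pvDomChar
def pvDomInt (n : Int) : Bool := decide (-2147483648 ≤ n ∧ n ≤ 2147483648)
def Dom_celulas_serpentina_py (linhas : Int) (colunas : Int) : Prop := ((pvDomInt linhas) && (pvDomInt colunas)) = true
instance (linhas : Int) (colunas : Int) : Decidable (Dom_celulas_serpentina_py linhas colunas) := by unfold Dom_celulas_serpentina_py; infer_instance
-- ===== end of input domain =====

-- B inverts the mapping: it iterates over the values 1..linhas*colunas and scatter-writes each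
-- value into its computed board position in a preallocated list, instead of A's traversal of
-- board positions computing each cell's value (objective: alternative).


-- ===== PORT A =====
def celulas_serpentina_py (linhas : Int) (colunas : Int) : List Int :=
  (PySem.List.pyRange 0 linhas 1).foldl (fun resultado visual_row =>
    let row_from_bottom := linhas - 1 - visual_row
    let even := PySem.Int.mod row_from_bottom 2 == 0
    (PySem.List.pyRange 0 colunas 1).foldl (fun acc col =>
      acc ++ [if even then row_from_bottom * colunas + (col + 1)
              else row_from_bottom * colunas + (colunas - col)]) resultado) []

-- ===== PORT B =====
-- 'out[i] = v' is PySem.List.pySetD; every index B writes is nonnegative and in range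
-- (proved below), where pySetD is exactly Python's item assignment.
def celulas_serpentina_py_alt (linhas : Int) (colunas : Int) : List Int :=
  if linhas ≤ 0 ∨ colunas ≤ 0 then []
  else
    let total := linhas * colunas
    (PySem.List.pyRange 1 (total + 1) 1).foldl (fun out v =>
      let r := PySem.Int.floordiv (v - 1) colunas
      let off := PySem.Int.mod (v - 1) colunas
      let col := if PySem.Int.mod r 2 == 0 then off else colunas - 1 - off
      PySem.List.pySetD out ((linhas - 1 - r) * colunas + col) v)
      (List.replicate total.toNat 0)

-- ===== PRECONDITION & SPEC =====
def Spec_celulas_serpentina_py (linhas : Int) (colunas : Int) (out : List Int) : Prop := out = celulas_serpentina_py_alt linhas colunas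
instance (linhas : Int) (colunas : Int) (out : List Int) : Decidable (Spec_celulas_serpentina_py linhas colunas out) := by unfold Spec_celulas_serpentina_py; infer_instance

-- ===== CLAIM (what is proved, stated in full; the proofs are below) =====
def Claim_equal_celulas_serpentina_py : Prop := ∀ (linhas : Int) (colunas : Int), Dom_celulas_serpentina_py linhas colunas → Spec_celulas_serpentina_py linhas colunas (celulas_serpentina_py linhas colunas)

-- ===== LEMMAS AND PROOFS =====

-- the value of the cell at flat position p on an L×C board (Nat arithmetic)
def pvVal (L C p : Nat) : Nat :=
  if (L - 1 - p / C) % 2 = 0 then (L - 1 - p / C) * C + p % C + 1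
  else (L - 1 - p / C) * C + (C - p % C)

-- the flat position of value k+1 on an L×C board (Nat arithmetic)
def pvPos (L C k : Nat) : Nat :=
  (L - 1 - k / C) * C + (if (k / C) % 2 = 0 then k % C else C - 1 - k % C)

theorem pv_div_mod (n c q : Nat) (hc : 0 < c) (hlt : q < c) :
    (n * c + q) / c = n ∧ (n * c + q) % c = q := by
  constructor
  · rw [mul_comm, Nat.mul_add_div hc, Nat.div_eq_of_lt hlt, add_zero]
  · rw [mul_comm, Nat.mul_add_mod, Nat.mod_eq_of_lt hlt]

theorem pvVal_pvPos (L C k : Nat) (hC : 0 < C) (hk : k < L * C) :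
    pvVal L C (pvPos L C k) = k + 1 := by
  have hr : k / C < L := (Nat.div_lt_iff_lt_mul hC).2 hk
  have hoff : k % C < C := Nat.mod_lt _ hC
  have hk' : k / C * C + k % C = k := by rw [mul_comm]; exact Nat.div_add_mod k C
  unfold pvPos pvVal
  generalize k / C = q at hr hk' ⊢
  generalize k % C = o at hoff hk' ⊢
  by_cases hpar : q % 2 = 0
  · rw [if_pos hpar]
    obtain ⟨hd, hm⟩ := pv_div_mod (L - 1 - q) C o hC hoff
    rw [hd, hm, show L - 1 - (L - 1 - q) = q by omega, if_pos hpar]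
    omega
  · rw [if_neg hpar]
    obtain ⟨hd, hm⟩ := pv_div_mod (L - 1 - q) C (C - 1 - o) hC (by omega)
    rw [hd, hm, show L - 1 - (L - 1 - q) = q by omega, if_neg hpar]
    omega

theorem pvVal_bounds (L C p : Nat) (hC : 0 < C) (hp : p < L * C) :
    1 ≤ pvVal L C p ∧ pvVal L C p ≤ L * C := by
  have hr : p / C < L := (Nat.div_lt_iff_lt_mul hC).2 hp
  have hoff : p % C < C := Nat.mod_lt _ hC
  unfold pvVal
  generalize p / C = q at hr ⊢
  generalize p % C = o at hoff ⊢
  have hL : 0 < L := lt_of_le_of_lt (Nat.zero_le _) hr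
  have hup : ∀ col, col ≤ C → (L - 1 - q) * C + col ≤ L * C := fun col hcol =>
    calc (L - 1 - q) * C + col ≤ (L - 1 - q) * C + C := Nat.add_le_add_left hcol _
      _ = (L - 1 - q + 1) * C := by ring
      _ ≤ L * C := Nat.mul_le_mul_right C (by omega)
  split_ifs
  · exact ⟨by omega, hup (o + 1) (by omega)⟩
  · exact ⟨by omega, by have := hup (C - o) (by omega); omega⟩

theorem pvPos_pvVal (L C p : Nat) (hC : 0 < C) (hp : p < L * C) :
    pvPos L C (pvVal L C p - 1) = p := by
  have hr : p / C < L := (Nat.div_lt_iff_lt_mul hC).2 hp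
  have hoff : p % C < C := Nat.mod_lt _ hC
  have hp' : p / C * C + p % C = p := by rw [mul_comm]; exact Nat.div_add_mod p C
  unfold pvPos pvVal
  generalize p / C = q at hr hp' ⊢
  generalize p % C = o at hoff hp' ⊢
  by_cases hpar : (L - 1 - q) % 2 = 0
  · rw [if_pos hpar, show (L - 1 - q) * C + o + 1 - 1 = (L - 1 - q) * C + o by omega]
    obtain ⟨hd, hm⟩ := pv_div_mod (L - 1 - q) C o hC hoff
    rw [hd, hm, show L - 1 - (L - 1 - q) = q by omega, if_pos hpar]
    omega
  · rw [if_neg hpar, show (L - 1 - q) * C + (C - o) - 1 = (L - 1 - q) * C + (C - 1 - o) by omega]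
    obtain ⟨hd, hm⟩ := pv_div_mod (L - 1 - q) C (C - 1 - o) hC (by omega)
    rw [hd, hm, show L - 1 - (L - 1 - q) = q by omega, if_neg hpar]
    omega

-- length of a scatter fold
theorem pv_scatter_len {α β : Type} (g : α → Nat) (h : α → β) (vs : List α) (init : List β) :
    (vs.foldl (fun l x => l.set (g x) (h x)) init).length = init.length := by
  induction vs generalizing init with
  | nil => rfl
  | cons v vs ih => simp [List.foldl, ih]

-- a scatter fold realises F at every covered position
theorem pv_scatter_get {α β : Type} (F : Nat → β) (g : α → Nat) (h : α → β) (vs : List α) :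
    (∀ x ∈ vs, F (g x) = h x) →
    ∀ (init : List β) (p : Nat), p < init.length →
      (p ∈ vs.map g ∨ init[p]? = some (F p)) →
      (vs.foldl (fun l x => l.set (g x) (h x)) init)[p]? = some (F p) := by
  induction vs with
  | nil =>
    intro _ init p _ hcov
    rcases hcov with hmem | hinit
    · simp at hmem
    · simpa using hinit
  | cons v vs ih =>
    intro hF init p hp hcov
    simp only [List.foldl_cons]
    refine ih (fun x hx => hF x (List.mem_cons_of_mem _ hx)) _ p (by simpa using hp) ?_
    by_cases hpv : p = g v
    · right
      subst hpv
      rw [List.getElem?_set_self hp]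
      exact congrArg some (hF v (by simp)).symm
    · rcases hcov with hmem | hinit
      · rcases List.mem_map.1 hmem with ⟨x, hx, hgx⟩
        rcases List.mem_cons.1 hx with rfl | hx'
        · exact absurd hgx.symm hpv
        · exact Or.inl (List.mem_map.2 ⟨x, hx', hgx⟩)
      · right
        rw [List.getElem?_set_ne (fun hh => hpv hh.symm)]
        exact hinit

-- A's nested loops as a flatMap of row maps
theorem pvA_flat (linhas colunas : Int) :
    celulas_serpentina_py linhas colunas =
      (PySem.List.pyRange 0 linhas 1).flatMap (fun v =>
        (PySem.List.pyRange 0 colunas 1).map (fun col =>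
          if PySem.Int.mod (linhas - 1 - v) 2 == 0 then (linhas - 1 - v) * colunas + (col + 1)
          else (linhas - 1 - v) * colunas + (colunas - col))) := by
  unfold celulas_serpentina_py
  simp only [PySem.List.foldl_append_singleton_eq_map]
  rw [PySem.List.foldl_append_eq_flatMap, List.nil_append]

-- one visual row of A equals pvVal on its block of positions
theorem pvRow (L C n : Nat) (hn : n < L) :
    (PySem.List.pyRange 0 (C : Int) 1).map (fun col =>
      if PySem.Int.mod ((L : Int) - 1 - (n : Int)) 2 == 0 then ((L : Int) - 1 - (n : Int)) * (C : Int) + (col + 1)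
      else ((L : Int) - 1 - (n : Int)) * (C : Int) + ((C : Int) - col))
    = (List.range C).map (fun c => (pvVal L C (n * C + c) : Int)) := by
  rw [PySem.List.pyRange_one, show ((C : Int) - 0).toNat = C by omega, List.map_map]
  apply List.map_congr_left
  intro c hc
  have hcC : c < C := List.mem_range.1 hc
  have hC : 0 < C := by omega
  have e1 : (L : Int) - 1 - (n : Int) = ((L - 1 - n : Nat) : Int) := by omega
  have hpar : PySem.Int.mod ((L : Int) - 1 - (n : Int)) 2 = (((L - 1 - n) % 2 : Nat) : Int) := by
    rw [e1]; exact_mod_cast PySem.Int.mod_natCast (L - 1 - n) 2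
  obtain ⟨hd, hm⟩ := pv_div_mod n C c hC hcC
  simp only [Function.comp_apply]
  unfold pvVal
  rw [hd, hm]
  rw [hpar] at *
  by_cases hp2 : (L - 1 - n) % 2 = 0
  · rw [if_pos hp2]
    simp only [hp2, Nat.cast_zero, beq_self_eq_true, if_true]
    rw [show (((L - 1 - n) * C + c + 1 : Nat) : Int)
          = ((L - 1 - n : Nat) : Int) * (C : Int) + ((c : Nat) : Int) + 1 by push_cast; ring, ← e1]
    ring
  · rw [if_neg hp2]
    have h3 : (L - 1 - n) % 2 = 1 := by omega
    simp only [h3, Nat.cast_one, show ((1 : Int) == 0) = false from rfl, Bool.false_eq_true,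
      if_false]
    have e2 : ((C - c : Nat) : Int) = (C : Int) - ((c : Nat) : Int) := by omega
    rw [show (((L - 1 - n) * C + (C - c) : Nat) : Int)
          = ((L - 1 - n : Nat) : Int) * (C : Int) + ((C - c : Nat) : Int) by push_cast; ring,
      ← e1, e2]
    ring

-- A's first n visual rows equal pvVal on the first n*C positions
theorem pvA_rows (L C : Nat) (n : Nat) (hn : n ≤ L) :
    (PySem.List.pyRange 0 (n : Int) 1).flatMap (fun v =>
      (PySem.List.pyRange 0 (C : Int) 1).map (fun col =>
        if PySem.Int.mod ((L : Int) - 1 - v) 2 == 0 then ((L : Int) - 1 - v) * (C : Int) + (col + 1)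
        else ((L : Int) - 1 - v) * (C : Int) + ((C : Int) - col)))
    = (List.range (n * C)).map (fun p => (pvVal L C p : Int)) := by
  induction n with
  | zero => simp [PySem.List.pyRange_one_eq_nil (by norm_num : (0 : Int) ≤ 0)]
  | succ m ih =>
    rw [show ((m + 1 : Nat) : Int) = ((m : Nat) : Int) + 1 by push_cast; ring,
        PySem.List.pyRange_one_succ_right (by positivity), List.flatMap_append,
        ih (by omega), show (m + 1) * C = m * C + C by ring, List.range_add,
        List.map_append, List.map_map]
    congr 1
    simp only [List.flatMap_cons, List.flatMap_nil, List.append_nil]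
    rw [pvRow L C m (by omega)]
    rfl

-- A equals the position-indexed map of pvVal
theorem pvA_eq_map (L C : Nat) :
    celulas_serpentina_py (L : Int) (C : Int) =
      (List.range (L * C)).map (fun p => (pvVal L C p : Int)) := by
  rw [pvA_flat]
  exact pvA_rows L C L le_rfl

-- B's write index at value 1+k is the flat position pvPos
theorem pvG_eq (L C k : Nat) (hC : 0 < C) (hk : k < L * C) :
    ((L : Int) - 1 - PySem.Int.floordiv (((1 : Int) + (k : Nat)) - 1) (C : Int)) * (C : Int) +
      (if PySem.Int.mod (PySem.Int.floordiv (((1 : Int) + (k : Nat)) - 1) (C : Int)) 2 == 0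
       then PySem.Int.mod (((1 : Int) + (k : Nat)) - 1) (C : Int)
       else (C : Int) - 1 - PySem.Int.mod (((1 : Int) + (k : Nat)) - 1) (C : Int))
    = ((pvPos L C k : Nat) : Int) := by
  have hr : k / C < L := (Nat.div_lt_iff_lt_mul hC).2 hk
  have h1 : ((1 : Int) + (k : Nat)) - 1 = ((k : Nat) : Int) := by push_cast; ring
  rw [h1, PySem.Int.floordiv_natCast, PySem.Int.mod_natCast]
  have hpar2 : PySem.Int.mod ((k / C : Nat) : Int) 2 = (((k / C) % 2 : Nat) : Int) := by
    exact_mod_cast PySem.Int.mod_natCast (k / C) 2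
  rw [hpar2]
  unfold pvPos
  have e1 : ((L - 1 - k / C : Nat) : Int) = (L : Int) - 1 - ((k / C : Nat) : Int) := by omega
  by_cases hp2 : (k / C) % 2 = 0
  · rw [if_pos (by rw [hp2]; decide), if_pos hp2]
    rw [show (((L - 1 - k / C) * C + k % C : Nat) : Int)
          = ((L - 1 - k / C : Nat) : Int) * (C : Int) + ((k % C : Nat) : Int) by push_cast; ring,
      e1]
  · rw [if_neg (by rw [show k / C % 2 = 1 from by omega]; decide), if_neg hp2]
    have e2 : ((C - 1 - k % C : Nat) : Int) = (C : Int) - 1 - ((k % C : Nat) : Int) := by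
      have := Nat.mod_lt k hC; omega
    rw [show (((L - 1 - k / C) * C + (C - 1 - k % C) : Nat) : Int)
          = ((L - 1 - k / C : Nat) : Int) * (C : Int) + ((C - 1 - k % C : Nat) : Int) by push_cast; ring,
      e1, e2]

-- B equals the same map (positive case)
theorem pvB_eq_map (L C : Nat) (hL : 0 < L) (hC : 0 < C) :
    celulas_serpentina_py_alt (L : Int) (C : Int) =
      (List.range (L * C)).map (fun p => (pvVal L C p : Int)) := by
  unfold celulas_serpentina_py_alt
  rw [if_neg (by push_cast; omega)]
  have htot : (L : Int) * (C : Int) = ((L * C : Nat) : Int) := by push_cast; ring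
  simp only [htot, Int.toNat_natCast]
  rw [PySem.List.pyRange_one, show (((L * C : Nat) : Int) + 1 - 1).toNat = L * C by omega,
      List.foldl_map]
  have hstep : ∀ (acc : List Int) (k : Nat), k ∈ List.range (L * C) →
      PySem.List.pySetD acc
          (((L : Int) - 1 - PySem.Int.floordiv ((1 : Int) + (k : Nat) - 1) (C : Int)) * (C : Int) +
            if PySem.Int.mod (PySem.Int.floordiv ((1 : Int) + (k : Nat) - 1) (C : Int)) 2 == 0
            then PySem.Int.mod ((1 : Int) + (k : Nat) - 1) (C : Int)
            else (C : Int) - 1 - PySem.Int.mod ((1 : Int) + (k : Nat) - 1) (C : Int))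
          ((1 : Int) + (k : Nat))
        = acc.set (pvPos L C k) ((1 : Int) + (k : Nat)) := by
    intro acc k hk
    have hkN : k < L * C := List.mem_range.1 hk
    rw [pvG_eq L C k hC hkN, PySem.List.pySetD_natCast]
  rw [PySem.List.foldl_congr_mem _ _ _ _ hstep]
  apply List.ext_getElem?
  intro p
  by_cases hp : p < L * C
  · rw [pv_scatter_get (fun p => (pvVal L C p : Int)) (fun k => pvPos L C k) (fun k => ((1 : Int) + (k : Nat))) _
        (by intro k hk
            have hkN : k < L * C := List.mem_range.1 hk
            have := pvVal_pvPos L C k hC hkN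
            simp only [this]
            push_cast
            ring)
        _ p (by simpa using hp)
        (Or.inl (List.mem_map.2 ⟨pvVal L C p - 1,
          List.mem_range.2 (by have := pvVal_bounds L C p hC hp; omega),
          by have hb := pvVal_bounds L C p hC hp
             exact pvPos_pvVal L C p hC hp⟩))]
    rw [List.getElem?_map, List.getElem?_range hp]
    rfl
  · rw [List.getElem?_eq_none, List.getElem?_eq_none]
    · simp only [List.length_map, List.length_range]; omega
    · rw [pv_scatter_len]
      simp only [List.length_replicate]; omega

-- ===== VERDICT (by name: the statement is the Claim_ definition above) =====
theorem celulas_serpentina_py_spec : Claim_equal_celulas_serpentina_py := by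
  intro linhas colunas _
  unfold Spec_celulas_serpentina_py
  by_cases h : linhas ≤ 0 ∨ colunas ≤ 0
  · have hB : celulas_serpentina_py_alt linhas colunas = [] := by
      unfold celulas_serpentina_py_alt; rw [if_pos h]
    rw [hB, pvA_flat]
    rcases h with h | h
    · rw [PySem.List.pyRange_one_eq_nil h]; rfl
    · simp [PySem.List.pyRange_one_eq_nil h]
  · push_neg at h
    obtain ⟨hL, hC⟩ := h
    have eL : linhas = ((linhas.toNat : Nat) : Int) := (Int.toNat_of_nonneg (by omega)).symm
    have eC : colunas = ((colunas.toNat : Nat) : Int) := (Int.toNat_of_nonneg (by omega)).symm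
    rw [eL, eC, pvA_eq_map, pvB_eq_map] <;> omega
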